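-- pv_equiv track=rewrite | github.com/RomanKalkreuth/program-synthesis-lecture | lecture/examples/chap-01/power_of_two.py | verify_inequality_recursive
-- ===== SOURCE A (Python) =====
-- def verify_inequality_recursive(n: int) -> bool:
--     """
--     Recursive verification of the statement 2^n > 2 * n
--     """
--     if n < 3:
--         raise ValueError("Statement not defined for n < 3")
--     elif n == 3:
--         return True
--     else:
--         p_k = 2 ** n > 2 * n
--         return verify_inequality_recursive(n - 1) if p_k else False
-- ===== SOURCE B (Python) =====
-- def verify_inequality_recursive(n: int) -> bool:
--     """
--     Recursive verification of the statement 2^n > 2 * n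
--     """
--     if n < 3:
--         raise ValueError("Statement not defined for n < 3")
--     return all(2 ** k > 2 * k for k in range(3, n + 1))
-- ===== Notes on version B (the rewrite author's own statement) =====
-- stated objective: idiomatic
-- what changed: Replaced the downward recursion with a single all() over range(3, n+1) checking 2**k > 2*k; same ValueError guard for n < 3.
import Mathlib
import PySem

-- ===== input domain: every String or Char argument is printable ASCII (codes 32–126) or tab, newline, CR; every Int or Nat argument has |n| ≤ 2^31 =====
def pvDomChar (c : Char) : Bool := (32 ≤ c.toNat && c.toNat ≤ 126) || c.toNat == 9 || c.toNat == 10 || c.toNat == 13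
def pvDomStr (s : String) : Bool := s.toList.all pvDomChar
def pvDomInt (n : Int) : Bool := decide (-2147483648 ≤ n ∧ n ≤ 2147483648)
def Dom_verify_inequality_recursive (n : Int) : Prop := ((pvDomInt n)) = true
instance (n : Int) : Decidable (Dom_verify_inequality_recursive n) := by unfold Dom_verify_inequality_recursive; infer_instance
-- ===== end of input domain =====

-- B replaces A's downward recursion with an all() over range(3, n+1); same result, idiomatic.

-- ===== PORT A =====
-- A's recursion: n == 3 → True; else check 2**n > 2*n, recurse on n-1.
-- (the n < 3 branch raises in Python; excluded by Pre_, the port returns true there vacuously)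
def verify_inequality_recursive (n : Int) : Bool :=
  if n ≤ 3 then true
  else
    let p_k : Bool := decide ((2 : Int) ^ n.toNat > 2 * n)
    if p_k then verify_inequality_recursive (n - 1) else false
termination_by (n - 3).toNat
decreasing_by omega

-- ===== PORT B =====
def verify_inequality_recursive_alt (n : Int) : Bool :=
  (PySem.List.pyRange 3 (n + 1) 1).all (fun k => decide ((2 : Int) ^ k.toNat > 2 * k))

-- ===== PRECONDITION & SPEC =====
-- Pre_ excludes n < 3, where the Python A raises ValueError.
def Pre_verify_inequality_recursive (n : Int) : Prop := 3 ≤ n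
instance (n : Int) : Decidable (Pre_verify_inequality_recursive n) := by unfold Pre_verify_inequality_recursive; infer_instance
def pvWitness_verify_inequality_recursive : Int := (5)

def Spec_verify_inequality_recursive (n : Int) (out : Bool) : Prop := out = verify_inequality_recursive_alt n
instance (n : Int) (out : Bool) : Decidable (Spec_verify_inequality_recursive n out) := by unfold Spec_verify_inequality_recursive; infer_instance

-- ===== CLAIM (what is proved, stated in full; the proofs are below) =====
def Claim_equal_verify_inequality_recursive : Prop := ∀ (n : Int), Dom_verify_inequality_recursive n → Pre_verify_inequality_recursive n → Spec_verify_inequality_recursive n (verify_inequality_recursive n)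

-- ===== LEMMAS AND PROOFS =====

-- the mathematical fact: 2^m > 2m for all natural m ≥ 3
lemma two_pow_gt_two_mul (m : Nat) (h : 3 ≤ m) : (2 : Int) * m < 2 ^ m := by
  induction m with
  | zero => omega
  | succ k ih =>
    rcases Nat.lt_or_ge k 3 with hk | hk
    · interval_cases k <;> simp_all
    · have := ih (by omega)
      have h2 : (2 : Int) ^ (k + 1) = 2 * 2 ^ k := by ring
      push_cast
      omega

lemma check_true (k : Int) (h : 3 ≤ k) : decide ((2 : Int) ^ k.toNat > 2 * k) = true := by
  have hk : (k.toNat : Int) = k := by omega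
  have := two_pow_gt_two_mul k.toNat (by omega)
  rw [hk] at this
  simp [this]

-- A returns true for all n ≥ 3
lemma portA_true (n : Int) (h : 3 ≤ n) : verify_inequality_recursive n = true := by
  by_cases h3 : n ≤ 3
  · unfold verify_inequality_recursive; simp [h3]
  · rw [verify_inequality_recursive]
    simp only [h3, if_false]
    rw [check_true n h]
    simpa using portA_true (n - 1) (by omega)
termination_by (n - 3).toNat
decreasing_by omega

-- B returns true for all n
lemma portB_true (n : Int) : verify_inequality_recursive_alt n = true := by
  unfold verify_inequality_recursive_alt
  rw [List.all_eq_true]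
  intro k hk
  rw [PySem.List.mem_pyRange_one] at hk
  exact check_true k hk.1

-- ===== VERDICT (by name: the statement is the Claim_ definition above) =====
theorem verify_inequality_recursive_spec : Claim_equal_verify_inequality_recursive := by
  intro n _ hpre
  unfold Spec_verify_inequality_recursive
  rw [portA_true n hpre, portB_true n]
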